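-- pv_equiv track=rewrite | github.com/criticalhitx/PythonAutomation | 03/getIPOctets.py | getIPOctets
-- ===== SOURCE A (Python) =====
-- def getIPOctets(ipaddr):
--     leng = len(ipaddr)
--     patokan=0
--     countOctet=0
--     IParr=[]
--     for i in range(0,len(ipaddr)-1):
--         if(ipaddr[i]=='.'):
--             outputOctet="" # string output to octet number
--             for j in range(patokan,i):
--                 outputOctet+=ipaddr[j]
--             patokan=i+1
--             IParr.append(int(outputOctet))
--             countOctet+=1
--         if(countOctet==3):
--             break
--     outputOctet=""
--     for k in range(patokan,len(ipaddr)):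
--         outputOctet+=ipaddr[k]
--     IParr.append(int(outputOctet))
--     return IParr
-- ===== SOURCE B (Python) =====
-- def getIPOctets(ipaddr):
--     # single split on the first three dots, then parse each field
--     return [int(x) for x in ipaddr.split('.', 3)]
-- ===== Notes on version B (the rewrite author's own statement) =====
-- stated objective: simpler
-- what changed: Replaces the hand-rolled character scan with manual patokan/countOctet state and an inner substring-building loop by one dot-split with maxsplit 3 plus an int() map; the maxsplit reproduces the loop's stop-after-three-dots behaviour exactly.
import Mathlib
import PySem

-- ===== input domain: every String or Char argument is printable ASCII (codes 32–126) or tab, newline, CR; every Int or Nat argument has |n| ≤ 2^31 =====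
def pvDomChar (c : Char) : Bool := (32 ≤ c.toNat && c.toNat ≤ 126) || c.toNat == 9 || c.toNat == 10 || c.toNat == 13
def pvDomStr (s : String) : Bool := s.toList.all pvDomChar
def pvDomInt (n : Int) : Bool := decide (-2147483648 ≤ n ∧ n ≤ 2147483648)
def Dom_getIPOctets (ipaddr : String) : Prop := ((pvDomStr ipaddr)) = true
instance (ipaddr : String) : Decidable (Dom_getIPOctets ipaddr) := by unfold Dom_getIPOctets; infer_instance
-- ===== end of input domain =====

-- B replaces A's char scan with manual patokan/countOctet state and inner substring loop
-- by one dot-split with maxsplit 3 plus an int() map (objective: simpler).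

-- ===== PORT A =====
-- int(outputOctet); the default 0 is never used on inputs admitted by Pre_ (Python raises ValueError there)
def pvParse (cs : List Char) : Int := (PySem.Int.ofChars? cs).getD 0

-- inner loop "for j in range(patokan, i): outputOctet += ipaddr[j]" (indices always in range in A)
def pvPieceA (s : List Char) (a b : Nat) : List Char :=
  (List.range' a (b - a)).foldl (fun out j => out ++ [s.getD j ' ']) []

-- outer loop "for i in range(0, len(ipaddr)-1)" with the countOctet==3 break,
-- followed by the trailing-piece code after the loop
def pvLoopA (s : List Char) (idxs : List Nat) (patokan countOctet : Nat) (iparr : List Int) : List Int :=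
  match idxs with
  | [] => iparr ++ [pvParse (pvPieceA s patokan s.length)]
  | i :: rest =>
    if s.getD i ' ' = '.' then
      let iparr' := iparr ++ [pvParse (pvPieceA s patokan i)]
      if countOctet + 1 = 3 then iparr' ++ [pvParse (pvPieceA s (i+1) s.length)]
      else pvLoopA s rest (i+1) (countOctet+1) iparr'
    else
      if countOctet = 3 then iparr ++ [pvParse (pvPieceA s patokan s.length)]
      else pvLoopA s rest patokan countOctet iparr

def getIPOctets (ipaddr : String) : List Int :=
  pvLoopA ipaddr.toList (List.range (ipaddr.toList.length - 1)) 0 0 []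

-- ===== PORT B =====
-- [int(x) for x in ipaddr.split('.', 3)]
def getIPOctets_alt (ipaddr : String) : List Int :=
  ((PySem.Str.splitMax? ipaddr "." 3).getD []).map (fun p => (PySem.Int.ofStr? p).getD 0)

-- ===== PRECONDITION & SPEC =====
-- Pre_: every field of the maxsplit-3 dot-split parses as an int — exactly where A's int() calls
-- all succeed (A raises ValueError otherwise).
def Pre_getIPOctets (ipaddr : String) : Prop :=
  ∀ p ∈ (PySem.Str.splitMax? ipaddr "." 3).getD [], (PySem.Int.ofStr? p).isSome = true
instance (ipaddr : String) : Decidable (Pre_getIPOctets ipaddr) := by unfold Pre_getIPOctets; infer_instance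

def pvWitness_getIPOctets : String := "192.168.0.1"

def Spec_getIPOctets (ipaddr : String) (out : List Int) : Prop := out = getIPOctets_alt ipaddr
instance (ipaddr : String) (out : List Int) : Decidable (Spec_getIPOctets ipaddr out) := by unfold Spec_getIPOctets; infer_instance

-- ===== CLAIM (what is proved, stated in full; the proofs are below) =====
def Claim_equal_getIPOctets : Prop := ∀ (ipaddr : String), Dom_getIPOctets ipaddr → Pre_getIPOctets ipaddr → Spec_getIPOctets ipaddr (getIPOctets ipaddr)

-- ===== LEMMAS AND PROOFS =====

-- proof-side spec of str.split('.', m): first piece and the remaining pieces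
def pvSpl (l : List Char) (m : Nat) : List Char × List (List Char) :=
  match m, l with
  | 0, l => (l, [])
  | _ + 1, [] => ([], [])
  | m + 1, c :: rest =>
    if c = '.' then ([], (pvSpl rest m).1 :: (pvSpl rest m).2)
    else ((c :: (pvSpl rest (m+1)).1), (pvSpl rest (m+1)).2)

theorem pvGo_spl (fuel : Nat) : ∀ (l : List Char) (m : Nat) (cur : List Char) (acc : List (List Char)),
    l.length < fuel →
    PySem.Chars.splitOnMax.go ['.'] fuel m l cur acc
      = acc.reverse ++ (cur.reverse ++ (pvSpl l m).1) :: (pvSpl l m).2 := by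
  induction fuel with
  | zero => intro l m cur acc h; omega
  | succ f ih =>
    intro l m cur acc h
    cases l with
    | nil =>
      rw [PySem.Chars.splitOnMax.go]
      · cases m <;> simp [pvSpl]
      · omega
    | cons c rest =>
      cases m with
      | zero =>
        rw [PySem.Chars.splitOnMax.go]
        simp [pvSpl]
      | succ m =>
        by_cases hc : c = '.'
        · subst hc
          rw [PySem.Chars.splitOnMax.go]
          simp only [List.isPrefixOf, BEq.rfl, Bool.true_and, if_true, Nat.add_sub_cancel, List.length_singleton, List.drop_one, List.tail_cons]
          rw [if_neg (by omega)]
          rw [ih rest m [] (cur.reverse :: acc) (by simpa using Nat.lt_of_succ_lt_succ h)]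
          simp [pvSpl]
        · rw [PySem.Chars.splitOnMax.go]
          simp only [List.isPrefixOf, Bool.and_true]
          rw [if_neg (by omega)]
          rw [if_neg (by simp [Ne.symm hc])]
          rw [ih rest (m+1) (c :: cur) acc (by simpa using Nat.lt_of_succ_lt_succ h)]
          simp [pvSpl, hc]

theorem pvPieces_eq (ipaddr : String) :
    (PySem.Str.splitMax? ipaddr "." 3).getD []
      = ((pvSpl ipaddr.toList 3).1 :: (pvSpl ipaddr.toList 3).2).map String.ofList := by
  have h1 : PySem.Str.splitMax? ipaddr "." 3
      = some ((PySem.Chars.splitOnMax ipaddr.toList ['.'] 3).map String.ofList) := by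
    simp [PySem.Str.splitMax?, PySem.Chars.splitMax?]
  have h2 : PySem.Chars.splitOnMax ipaddr.toList ['.'] 3
      = (pvSpl ipaddr.toList 3).1 :: (pvSpl ipaddr.toList 3).2 := by
    rw [PySem.Chars.splitOnMax]
    rw [if_neg (by norm_num)]
    rw [show (3:Int).toNat = 3 from rfl]
    rw [pvGo_spl (ipaddr.toList.length + 1) ipaddr.toList 3 [] [] (by omega)]
    simp
  rw [h1, h2]
  rfl

theorem pvAlt_eq (ipaddr : String) :
    getIPOctets_alt ipaddr
      = ((pvSpl ipaddr.toList 3).1 :: (pvSpl ipaddr.toList 3).2).map pvParse := by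
  unfold getIPOctets_alt
  rw [pvPieces_eq]
  simp [pvParse, PySem.Int.ofStr?, Function.comp]

theorem pvSpl_no_dot (l : List Char) (m : Nat) (h : '.' ∉ l) : pvSpl l m = (l, []) := by
  induction l generalizing m with
  | nil => cases m <;> rfl
  | cons c rest ih =>
    cases m with
    | zero => rfl
    | succ m =>
      have hc : ¬ (c = '.') := fun hc => h (hc ▸ List.mem_cons_self)
      have hr : '.' ∉ rest := fun hr => h (List.mem_cons_of_mem _ hr)
      simp [pvSpl, hc, ih (m+1) hr]

theorem pvSpl_dot (p rest : List Char) (m : Nat) (hp : '.' ∉ p) :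
    pvSpl (p ++ '.' :: rest) (m+1) = (p, (pvSpl rest m).1 :: (pvSpl rest m).2) := by
  induction p with
  | nil => simp [pvSpl]
  | cons a p' ih =>
    have ha : ¬ (a = '.') := fun h => hp (h ▸ List.mem_cons_self)
    have hp' : '.' ∉ p' := fun h => hp (List.mem_cons_of_mem _ h)
    simp [pvSpl, ha, ih hp']

theorem pvMapGetD_range' (s : List Char) (d : Nat) : ∀ (a : Nat), a + d ≤ s.length →
    (List.range' a d).map (fun j => s.getD j ' ') = (s.drop a).take d := by
  induction d with
  | zero => intro a _; simp
  | succ d ih =>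
    intro a h
    rw [List.range'_succ, List.map_cons, ih (a+1) (by omega)]
    have ha : a < s.length := by omega
    rw [List.drop_eq_getElem_cons ha, List.take_succ_cons, List.getD_eq_getElem s ' ' ha]

theorem pvPieceA_eq (s : List Char) (a d : Nat) (h : a + d ≤ s.length) :
    pvPieceA s a (a + d) = (s.drop a).take d := by
  unfold pvPieceA
  rw [PySem.List.foldl_append_singleton_eq_map]
  simpa using pvMapGetD_range' s d a h

theorem pvGetD_shift (s l : List Char) (patokan t : Nat) (hd : s.drop patokan = l) :
    s.getD (patokan + t) ' ' = l.getD t ' ' := by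
  subst hd
  simp [List.getD_eq_getElem?_getD, List.getElem?_drop]

theorem pvLoopA_skip (s : List Char) (d : Nat) : ∀ (j e patokan count : Nat) (acc : List Int),
    count ≤ 2 → (∀ t, t < d → s.getD (j+t) ' ' ≠ '.') →
    pvLoopA s (List.range' j (d + e)) patokan count acc
      = pvLoopA s (List.range' (j + d) e) patokan count acc := by
  induction d with
  | zero => intro j e patokan count acc _ _; simp
  | succ d ih =>
    intro j e patokan count acc hc hnd
    have h1 : d + 1 + e = (d + e) + 1 := by omega
    rw [h1, List.range'_succ]
    have hj : s.getD (j + 0) ' ' ≠ '.' := hnd 0 (by omega)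
    simp only [Nat.add_zero] at hj
    simp only [pvLoopA]
    rw [if_neg hj, if_neg (by omega)]
    have := ih (j+1) e patokan count acc hc (fun t ht => by
      have := hnd (t+1) (by omega); simpa [Nat.add_assoc, Nat.add_comm 1 t] using this)
    rw [this]
    have : j + 1 + d = j + (d + 1) := by omega
    rw [this]

theorem pvNoDot (s l : List Char) (count patokan : Nat) (acc : List Int)
    (hc : count ≤ 2) (hpat : patokan ≤ s.length) (hd : s.drop patokan = l) (hnd : '.' ∉ l) :
    pvLoopA s (List.range' patokan (s.length - 1 - patokan)) patokan count acc
      = acc ++ [pvParse l] := by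
  have hlen : s.length = patokan + l.length := by
    have := List.length_drop (l := s) (i := patokan); rw [hd] at this; omega
  have hskip := pvLoopA_skip s (s.length - 1 - patokan) patokan 0 patokan count acc hc (by
    intro t ht
    rw [pvGetD_shift s l patokan t hd]
    have htl : t < l.length := by omega
    rw [List.getD_eq_getElem l ' ' htl]
    exact fun h => hnd (h ▸ List.getElem_mem htl))
  simp only [Nat.add_zero] at hskip
  rw [hskip]
  simp only [List.range'_zero, pvLoopA]
  have : s.length = patokan + l.length := hlen
  rw [this, pvPieceA_eq s patokan l.length (by omega), hd, List.take_length]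

theorem pvGetLastD_mem {α : Type} (l : List α) (d : α) : l.getLastD d ∈ d :: l := by
  induction l generalizing d with
  | nil => simp
  | cons a t ih =>
    rw [List.getLastD_cons]
    exact List.mem_cons_of_mem d (ih a)

theorem pvFirstSplit (l : List Char) (h : '.' ∈ l) :
    ∃ p rest, l = p ++ '.' :: rest ∧ '.' ∉ p := by
  induction l with
  | nil => cases h
  | cons c t ih =>
    by_cases hc : c = '.'
    · exact ⟨[], t, by simp [hc], by simp⟩
    · have ht : '.' ∈ t := by
        rcases List.mem_cons.mp h with h1 | h1
        · exact absurd h1.symm hc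
        · exact h1
      obtain ⟨p, rest, hpr, hp⟩ := ih ht
      refine ⟨c :: p, rest, by simp [hpr], ?_⟩
      intro hm
      rcases List.mem_cons.mp hm with h1 | h1
      · exact hc h1.symm
      · exact hp h1

theorem pvMainA (s : List Char) (N : Nat) : ∀ (l : List Char), l.length ≤ N →
    ∀ (count patokan : Nat) (acc : List Int),
    count ≤ 2 → patokan ≤ s.length → s.drop patokan = l →
    ((pvSpl l (3-count)).2).getLastD (pvSpl l (3-count)).1 ≠ [] →
    pvLoopA s (List.range' patokan (s.length - 1 - patokan)) patokan count acc
      = acc ++ ((pvSpl l (3-count)).1 :: (pvSpl l (3-count)).2).map pvParse := by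
  induction N with
  | zero =>
    intro l hN count patokan acc hc hpat hd _
    have hl : l = [] := List.eq_nil_of_length_eq_zero (by omega)
    subst hl
    rw [pvSpl_no_dot [] (3-count) (by simp)]
    simpa using pvNoDot s [] count patokan acc hc hpat hd (by simp)
  | succ N ih =>
    intro l hN count patokan acc hc hpat hd hlast
    by_cases hdot : '.' ∈ l
    · obtain ⟨p, rest, hpr, hp⟩ := pvFirstSplit l hdot
      subst hpr
      have hm : 3 - count = (2 - count) + 1 := by omega
      rw [hm] at hlast ⊢
      rw [pvSpl_dot p rest (2-count) hp] at hlast ⊢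
      simp only [List.getLastD_cons] at hlast
      have hrest_ne : rest ≠ [] := by
        intro hr; subst hr
        have : pvSpl [] (2-count) = ([], []) := by cases h2 : (2-count) <;> rfl
        rw [this] at hlast; simp at hlast
      have hlen : s.length = patokan + p.length + 1 + rest.length := by
        have := List.length_drop (l := s) (i := patokan); rw [hd] at this; simp at this; omega
      have hrl : 0 < rest.length := List.length_pos_iff.mpr hrest_ne
      -- skip the dot-free prefix p; the dot sits at index patokan + p.length
      have hskip := pvLoopA_skip s p.length patokan (s.length - 1 - patokan - p.length)
          patokan count acc hc (by
        intro t ht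
        rw [pvGetD_shift s _ patokan t hd]
        rw [List.getD_eq_getElem?_getD, List.getElem?_append_left ht,
            ← List.getD_eq_getElem?_getD, List.getD_eq_getElem p ' ' ht]
        exact fun h => hp (h ▸ List.getElem_mem ht))
      have harith : p.length + (s.length - 1 - patokan - p.length) = s.length - 1 - patokan := by
        omega
      rw [harith] at hskip
      rw [hskip]
      have harith2 : s.length - 1 - patokan - p.length
          = (s.length - 2 - (patokan + p.length)) + 1 := by omega
      rw [harith2, List.range'_succ]
      have hdi : s.getD (patokan + p.length) ' ' = '.' := by
        rw [pvGetD_shift s _ patokan p.length hd]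
        simp [List.getD_eq_getElem?_getD]
      have hpiece : pvPieceA s patokan (patokan + p.length) = p := by
        rw [pvPieceA_eq s patokan p.length (by omega), hd]
        simp
      have hdrop : s.drop (patokan + p.length + 1) = rest := by
        have h' : s.drop (patokan + p.length + 1) = (s.drop patokan).drop (p.length + 1) := by
          rw [List.drop_drop, Nat.add_assoc]
        rw [h', hd]
        simp [List.drop_append]
      simp only [pvLoopA]
      rw [if_pos hdi]
      by_cases h3 : count + 1 = 3
      · rw [if_pos h3]
        have h20 : 2 - count = 0 := by omega
        rw [h20]
        have hsp0 : pvSpl rest 0 = (rest, []) := by cases rest <;> rfl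
        rw [hsp0]
        have hfin : pvPieceA s (patokan + p.length + 1) s.length = rest := by
          have h' : s.length = (patokan + p.length + 1) + rest.length := by omega
          rw [h', pvPieceA_eq s (patokan + p.length + 1) rest.length (by omega), hdrop,
              List.take_length]
        rw [hpiece, hfin]
        simp
      · rw [if_neg h3]
        have hrec := ih rest (by
          simp at hN
          omega) (count + 1) (patokan + p.length + 1)
          (acc ++ [pvParse (pvPieceA s patokan (patokan + p.length))])
          (by omega) (by omega) hdrop (by
            have h' : 3 - (count + 1) = 2 - count := by omega
            rw [h']; exact hlast)
        have hmeq : 3 - (count + 1) = 2 - count := by omega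
        rw [hmeq] at hrec
        have harith3 : s.length - 1 - (patokan + p.length + 1)
            = s.length - 2 - (patokan + p.length) := by omega
        rw [harith3] at hrec
        rw [hrec, hpiece]
        simp
    · rw [pvSpl_no_dot l (3-count) hdot] at hlast ⊢
      simpa using pvNoDot s l count patokan acc hc hpat hd hdot

-- ===== VERDICT (by name: the statement is the Claim_ definition above) =====
theorem getIPOctets_spec : Claim_equal_getIPOctets := by
  intro ipaddr _ hpre
  unfold Spec_getIPOctets
  rw [pvAlt_eq]
  unfold getIPOctets
  unfold Pre_getIPOctets at hpre
  rw [pvPieces_eq] at hpre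
  have hlast : ((pvSpl ipaddr.toList 3).2).getLastD (pvSpl ipaddr.toList 3).1 ≠ [] := by
    intro hnil
    have hmem : ((pvSpl ipaddr.toList 3).2).getLastD (pvSpl ipaddr.toList 3).1
        ∈ (pvSpl ipaddr.toList 3).1 :: (pvSpl ipaddr.toList 3).2 :=
      pvGetLastD_mem _ _
    have := hpre (String.ofList (((pvSpl ipaddr.toList 3).2).getLastD (pvSpl ipaddr.toList 3).1))
      (List.mem_map_of_mem hmem)
    rw [hnil] at this
    simp [PySem.Int.ofStr?] at this
    exact absurd this (by decide)
  have := pvMainA ipaddr.toList ipaddr.toList.length ipaddr.toList (le_refl _) 0 0 []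
    (by omega) (by omega) (by simp) (by simpa using hlast)
  rw [List.range_eq_range']
  simpa using this
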